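-- pv_equiv track=rewrite | github.com/blackheart-5/Facebook-Social-Network-system | proj05.py | calc_similarity_scores
-- ===== SOURCE A (Python) =====
-- def num_in_common_between_lists(list1, list2):
--     ''' loop for each element in list1
--             check if that element in list2 and append to an common list
--             otherwise continue to the next iteration
--             return the lenght of items in common, which is the number of users
--             is common between list1 and list2
--      '''
--     common = []
--     for i in list1:
--         if i in list2:
--             common.append(i)
--         else:
--             continue
--     return len(common)
--
-- def calc_similarity_scores(n):
--     ''' loop and create a list of lists that is n x n in size to all zeros that will hold
--         number of common friends for each pairing of users.
--         loop through the network  of users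
--             for each friends in each (user)
--                 find the number of friends in common
--                 place that value at the position of the same friend and user in the similarity similarity_matrix
--         return the similarity matrix '''
--     similarity_matrix = []
--
--     for i in range(len(n)):
--         new = []
--         for e in range(len(n)):
--             new.append(0)
--         similarity_matrix.append(new)
--
--     for m, v in enumerate(n):
--         for user_ids in range(len(n)):
--             c = num_in_common_between_lists(n[m], n[user_ids])
--             similarity_matrix[m][user_ids] = c
--     return similarity_matrix
-- ===== SOURCE B (Python) =====
-- def calc_similarity_scores(n):
--     # Inverted index: friend id -> list of user indices whose friend list contains it.
--     index = {}
--     for j, friends in enumerate(n):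
--         for f in set(friends):
--             index.setdefault(f, []).append(j)
--     size = len(n)
--     matrix = [[0] * size for _ in range(size)]
--     # Accumulate co-occurrences: friend f of user i (with multiplicity) contributes
--     # 1 to matrix[i][j] for every user j whose list contains f.
--     for i, friends in enumerate(n):
--         for f in friends:
--             for j in index.get(f, []):
--                 matrix[i][j] += 1
--     return matrix
-- ===== Notes on version B (the rewrite author's own statement) =====
-- stated objective: faster
-- what changed: Replaces the per-pair rescans (for every (i,j) pair, scan n[i] and for each element scan n[j]) by an inverted index from friend id to the users containing it, filling the matrix by co-occurrence accumulation in one pass over all friend lists.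
import Mathlib
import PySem

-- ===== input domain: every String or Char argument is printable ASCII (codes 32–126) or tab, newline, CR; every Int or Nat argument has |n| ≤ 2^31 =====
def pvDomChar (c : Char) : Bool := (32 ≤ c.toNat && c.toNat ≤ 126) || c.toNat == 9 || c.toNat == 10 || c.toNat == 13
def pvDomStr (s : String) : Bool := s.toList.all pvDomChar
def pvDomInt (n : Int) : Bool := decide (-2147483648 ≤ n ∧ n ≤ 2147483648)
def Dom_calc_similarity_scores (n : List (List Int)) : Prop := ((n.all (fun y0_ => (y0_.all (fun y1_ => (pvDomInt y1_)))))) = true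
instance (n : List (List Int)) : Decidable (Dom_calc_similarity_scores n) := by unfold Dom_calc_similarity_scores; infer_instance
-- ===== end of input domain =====

-- B replaces A's per-pair rescans by an inverted index (friend id -> users containing it)
-- and fills the matrix by co-occurrence accumulation: objective 'faster'.


-- ===== PORT A =====
def num_in_common_between_lists (list1 list2 : List Int) : Int :=
  ((list1.foldl (fun common i => if list2.contains i then common ++ [i] else common)
      ([] : List Int)).length : Int)

def calc_similarity_scores (n : List (List Int)) : List (List Int) :=
  let similarity_matrix :=
    (PySem.List.pyRange 0 (n.length : Int)).foldl
      (fun sm _ =>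
        sm ++ [(PySem.List.pyRange 0 (n.length : Int)).foldl (fun new _ => new ++ [(0 : Int)]) []])
      []
  (PySem.List.enumerate n).foldl
    (fun sm mv =>
      (PySem.List.pyRange 0 (n.length : Int)).foldl
        (fun sm user_ids =>
          sm.modify mv.1.toNat (fun row =>
            row.set user_ids.toNat
              (num_in_common_between_lists (PySem.List.pyGetD n mv.1 [])
                (PySem.List.pyGetD n user_ids []))))
        sm)
    similarity_matrix

-- ===== PORT B =====
-- the inverted index 'index' built by the first loop of Source B (friend id -> user indices)
def pvIndexB (n : List (List Int)) : PySem.Dict Int (List Int) :=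
  (PySem.List.enumerate n).foldl
    (fun d p =>
      (PySem.Set.ofList p.2).foldl (fun d f => d.modify f [] (fun l => l ++ [p.1])) d)
    PySem.Dict.empty

def calc_similarity_scores_alt (n : List (List Int)) : List (List Int) :=
  let index := pvIndexB n
  let size := n.length
  let matrix := List.replicate size (List.replicate size (0 : Int))
  (PySem.List.enumerate n).foldl
    (fun mat p =>
      p.2.foldl
        (fun mat f =>
          (index.getD f []).foldl
            (fun mat j => mat.modify p.1.toNat (fun row => row.modify j.toNat (fun v => v + 1)))
            mat)
        mat)
    matrix

-- ===== PRECONDITION & SPEC =====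
def Spec_calc_similarity_scores (n : List (List Int)) (out : List (List Int)) : Prop := out = calc_similarity_scores_alt n
instance (n : List (List Int)) (out : List (List Int)) : Decidable (Spec_calc_similarity_scores n out) := by unfold Spec_calc_similarity_scores; infer_instance

-- ===== CLAIM (what is proved, stated in full; the proofs are below) =====
def Claim_equal_calc_similarity_scores : Prop := ∀ (n : List (List Int)), Dom_calc_similarity_scores n → Spec_calc_similarity_scores n (calc_similarity_scores n)

-- ===== LEMMAS AND PROOFS =====

-- the common closed form of entry (i, j): how many x in n[i] (with multiplicity) lie in n[j]
def pvC (n : List (List Int)) (i j : Nat) : Int :=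
  (((n.getD i []).filter (fun x => (n.getD j []).contains x)).length : Int)

theorem pv_num_in_common (l1 l2 : List Int) :
    num_in_common_between_lists l1 l2 = ((l1.filter (fun x => l2.contains x)).length : Int) := by
  unfold num_in_common_between_lists
  rw [PySem.List.foldl_append_if_eq_filter]
  rw [List.nil_append]

-- 'out.append(z)' loops build replicates
theorem pv_foldl_const_append {α : Type} (l : List α) {β : Type} (z : β) (acc : List β) :
    l.foldl (fun acc _ => acc ++ [z]) acc = acc ++ List.replicate l.length z := by
  rw [PySem.List.foldl_append_singleton_eq_map (fun _ => z) l acc, List.map_const']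

-- nested loop, the inner body also using the outer element
theorem pv_foldl_flatten_pair {β γ δ : Type} (l : List β) (g : β → List γ)
    (h : δ → γ → β → δ) : ∀ (d : δ),
    l.foldl (fun d p => (g p).foldl (fun d f => h d f p) d) d
      = (l.flatMap (fun p => (g p).map (fun f => (f, p)))).foldl (fun d q => h d q.1 q.2) d := by
  induction l with
  | nil => intro d; rfl
  | cons x l ih => intro d; simp [List.foldl_append, List.foldl_map, ih]

-- a loop that only ever modifies slot m is one modification of slot m
theorem pv_foldl_modify_comm {α β : Type} (l : List β) (m : Nat) (g : β → α → α) :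
    ∀ (mat : List α),
    l.foldl (fun mat x => mat.modify m (g x)) mat
      = mat.modify m (fun a => l.foldl (fun a x => g x a) a) := by
  induction l with
  | nil => intro mat; exact (List.modify_id m mat).symm
  | cons x l ih => intro mat; rw [List.foldl_cons, ih, List.modify_modify_eq]; rfl

theorem pv_length_foldl_set (f : Nat → Int) :
    ∀ (l : List Nat) (row : List Int),
    (l.foldl (fun r j => r.set j (f j)) row).length = row.length := by
  intro l
  induction l with
  | nil => intro row; rfl
  | cons x l ih => intro row; simp [ih]

theorem pv_length_foldl_modify :
    ∀ (l : List Nat) (row : List Int),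
    (l.foldl (fun r u => r.modify u (fun v => v + 1)) row).length = row.length := by
  intro l
  induction l with
  | nil => intro row; rfl
  | cons x l ih => intro row; simp [ih]

-- 'row[j] = f j for j in range(k)' characterised elementwise
theorem pv_setRange_getElem (f : Nat → Int) :
    ∀ (k : Nat) (row : List Int) (t : Nat),
    ((List.range k).foldl (fun r j => r.set j (f j)) row)[t]?
      = if t < k ∧ t < row.length then some (f t) else row[t]? := by
  intro k
  induction k with
  | zero => intro row t; simp
  | succ k ih =>
      intro row t
      rw [List.range_succ, List.foldl_append, List.foldl_cons, List.foldl_nil,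
        List.getElem?_set, pv_length_foldl_set, ih]
      by_cases hk : k = t
      · subst hk
        by_cases hl : k < row.length
        · simp [hl]
        · rw [if_pos rfl, if_neg hl, if_neg (fun h => hl h.2),
            List.getElem?_eq_none (show row.length ≤ k by omega)]
      · have h1 : (t < k ∧ t < row.length) = (t < k + 1 ∧ t < row.length) := by
          simp only [eq_iff_iff]; omega
        simp [hk, h1]

-- a loop over range(k) whose body modifies exactly slot i, characterised elementwise
theorem pv_modifyRange_getElem (F : Nat → List Int → List Int)
    (G : List (List Int) → Nat → List (List Int))
    (hG : ∀ mat m, G mat m = mat.modify m (F m)) :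
    ∀ (k : Nat) (mat : List (List Int)) (t : Nat),
    ((List.range k).foldl G mat)[t]? = if t < k then (mat[t]?).map (F t) else mat[t]? := by
  intro k
  induction k with
  | zero => intro mat t; simp
  | succ k ih =>
      intro mat t
      rw [List.range_succ, List.foldl_append, List.foldl_cons, List.foldl_nil, hG,
        List.getElem?_modify, ih]
      by_cases hk : k = t
      · subst hk
        simp
      · by_cases ht : t < k
        · have : t < k + 1 := by omega
          simp only [ht, this, if_pos]
          cases mat[t]? <;> simp [hk]
        · have : ¬ t < k + 1 := by omega
          simp only [ht, this, if_false]
          cases mat[t]? <;> simp [hk]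

-- 'matrix[i][j] += 1' accumulation counts occurrences
theorem pv_addCount_getD :
    ∀ (L : List Nat) (row : List Int) (t : Nat), t < row.length →
    (L.foldl (fun r u => r.modify u (fun v => v + 1)) row).getD t 0
      = row.getD t 0 + (L.count t : Int) := by
  intro L
  induction L with
  | nil => intro row t ht; simp
  | cons j L ih =>
      intro row t ht
      rw [List.foldl_cons, ih _ _ (by simp [ht]), List.count_cons]
      have hmod : (row.modify j (fun v => v + 1)).getD t 0
          = if j = t then row.getD t 0 + 1 else row.getD t 0 := by
        rw [List.getD_eq_getElem?_getD, List.getElem?_modify,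
          List.getElem?_eq_getElem ht]
        by_cases hj : j = t <;> simp [hj, List.getD_eq_getElem?_getD, List.getElem?_eq_getElem ht]
      rw [hmod]
      by_cases hj : j = t
      · simp [hj]; ring
      · simp [hj]

theorem pv_flatMap_ite {α β : Type} (p : α → Bool) (u : α → β) :
    ∀ (l : List α), l.flatMap (fun x => if p x then [u x] else []) = (l.filter p).map u := by
  intro l
  induction l with
  | nil => rfl
  | cons x l ih => by_cases hx : p x <;> simp [hx, ih]

-- counting t across the flattened per-friend index lists
theorem pv_count_flatMap (len t : Nat) (ht : t < len) (pm : Int → Nat → Bool) :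
    ∀ (fr : List Int),
    ((fr.flatMap (fun f => (List.range len).filter (fun j => pm f j))).count t)
      = (fr.filter (fun f => pm f t)).length := by
  intro fr
  induction fr with
  | nil => rfl
  | cons f fr ih =>
      rw [List.flatMap_cons, List.count_append, ih]
      have hnd : ((List.range len).filter (fun j => pm f j)).Nodup :=
        (List.nodup_range).filter _
      by_cases hp : pm f t
      · have hmem : t ∈ (List.range len).filter (fun j => pm f j) := by
          simp [List.mem_filter, List.mem_range, ht, hp]
        rw [List.count_eq_one_of_mem hnd hmem]
        simp [hp, Nat.add_comm]
      · have hmem : t ∈ (List.range len).filter (fun j => pm f j) → False := by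
          simp [List.mem_filter, hp]
        rw [List.count_eq_zero_of_not_mem hmem]
        simp [hp]

-- the inverted index holds, for each friend id, exactly the users whose list contains it
theorem pv_index_getD (n : List (List Int)) (f : Int) :
    (pvIndexB n).getD f []
      = ((List.range n.length).filter (fun j => (n.getD j []).contains f)).map
          (fun (j : Nat) => (j : Int)) := by
  unfold pvIndexB
  rw [pv_foldl_flatten_pair]
  rw [← List.foldl_map (f := fun q : Int × (Int × List Int) => (q.1, q.2.1))
    (g := fun (d : PySem.Dict Int (List Int)) (p : Int × Int) => d.modify p.1 [] (fun l => l ++ [p.2]))]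
  rw [PySem.Dict.getD_foldl_modify_append]
  rw [List.map_flatMap]
  rw [List.filter_flatMap]
  rw [List.map_flatMap]
  have hper : ∀ p : Int × List Int,
      (List.map (fun x => x.2)
        (List.filter (fun q => q.1 == f)
          (List.map (fun q : Int × (Int × List Int) => (q.1, q.2.1))
            (List.map (fun g => (g, p)) (PySem.Set.ofList p.2)))))
        = if (p.2).contains f then [p.1] else [] := by
    intro p
    rw [List.map_map]
    rw [show ((fun q : Int × (Int × List Int) => (q.1, q.2.1)) ∘ (fun g => (g, p))) = (fun g => (g, p.1)) from rfl]
    rw [List.filter_map]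
    rw [show ((fun q : Int × Int => q.1 == f) ∘ (fun g => (g, p.1))) = (fun g => g == f) from rfl]
    rw [List.filter_beq]
    by_cases hm : f ∈ p.2
    · have h1 : (PySem.Set.ofList p.2).count f = 1 :=
        List.count_eq_one_of_mem (PySem.Set.nodup_ofList p.2) ((PySem.Set.mem_ofList p.2 f).mpr hm)
      simp [hm]
    · have h0 : (PySem.Set.ofList p.2).count f = 0 :=
        List.count_eq_zero_of_not_mem (fun hc => hm ((PySem.Set.mem_ofList p.2 f).mp hc))
      simp [h0, hm]
  rw [List.flatMap_congr (fun p _ => hper p)]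
  rw [PySem.List.enumerate_eq_map_pyRange n []]
  rw [List.flatMap_map]
  rw [PySem.List.len_eq, PySem.List.pyRange_zero_nat]
  rw [List.flatMap_map]
  simp only [PySem.List.pyGetD_natCast]
  rw [pv_flatMap_ite (fun k => (n.getD k []).contains f) (fun k => ((k : Nat) : Int))]
  simp [PySem.Dict.getD, PySem.Dict.get?, PySem.Dict.empty]

-- the inner double loop of B's accumulation only ever modifies row m
theorem pv_B_inner (n : List (List Int)) (m : Nat) :
    ∀ (fr : List Int) (mat : List (List Int)),
    fr.foldl
        (fun mat f =>
          ((pvIndexB n).getD f []).foldl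
            (fun mat j => mat.modify m (fun row => row.modify j.toNat (fun v => v + 1)))
            mat)
        mat
      = mat.modify m
          (fun row =>
            ((fr.flatMap (fun f => (pvIndexB n).getD f [])).map Int.toNat).foldl
              (fun row u => row.modify u (fun v => v + 1)) row) := by
  intro fr
  induction fr with
  | nil => intro mat; exact (List.modify_id m mat).symm
  | cons f fr ih =>
      intro mat
      rw [List.foldl_cons]
      simp only [pv_foldl_modify_comm ((pvIndexB n).getD f []) m
          (fun (j : Int) (row : List Int) => row.modify j.toNat (fun v => v + 1))]
      rw [ih, List.modify_modify_eq]
      congr 1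
      funext row
      simp only [Function.comp, List.flatMap_cons, List.map_append, List.foldl_append,
        List.foldl_map]

theorem pv_alt_eq (n : List (List Int)) :
    calc_similarity_scores_alt n
      = (List.range n.length).map (fun i => (List.range n.length).map (fun j => pvC n i j)) := by
  simp only [calc_similarity_scores_alt]
  rw [PySem.List.enumerate_eq_map_pyRange n []]
  rw [PySem.List.len_eq, PySem.List.pyRange_zero_nat, List.map_map, List.foldl_map]
  simp only [Function.comp, PySem.List.pyGetD_natCast, Int.toNat_natCast]
  apply List.ext_getElem?
  intro t
  rw [pv_modifyRange_getElem
    (F := fun i row =>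
      (((n.getD i []).flatMap (fun f => (pvIndexB n).getD f [])).map Int.toNat).foldl
        (fun row u => row.modify u (fun v => v + 1)) row)
    (G := fun mat k =>
      (n.getD k []).foldl
        (fun mat f =>
          ((pvIndexB n).getD f []).foldl
            (fun mat j => mat.modify k (fun row => row.modify j.toNat (fun v => v + 1)))
            mat)
        mat)
    (hG := fun mat m => pv_B_inner n m (n.getD m []) mat)]
  by_cases ht : t < n.length
  · rw [if_pos ht, List.getElem?_replicate, if_pos ht, List.getElem?_map,
      List.getElem?_range ht, Option.map_some]
    congr 1
    have hJ : (((n.getD t []).flatMap (fun f => (pvIndexB n).getD f [])).map Int.toNat)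
        = (n.getD t []).flatMap
            (fun f => (List.range n.length).filter (fun j => (n.getD j []).contains f)) := by
      simp [pv_index_getD, List.map_flatMap, List.map_map, Function.comp_def]
    rw [hJ]
    apply List.ext_getElem
    · simp [pv_length_foldl_modify]
    intro s hs1 hs2
    have hs : s < n.length := by
      have := hs1
      rw [pv_length_foldl_modify, List.length_replicate] at this
      exact this
    rw [List.getElem_map, List.getElem_range]
    rw [← List.getD_eq_getElem _ 0 hs1]
    rw [pv_addCount_getD _ _ _ (by rw [List.length_replicate]; exact hs)]
    rw [pv_count_flatMap n.length s hs (fun f j => (n.getD j []).contains f) (n.getD t [])]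
    simp [pvC]
  · rw [if_neg ht, List.getElem?_replicate, if_neg ht]
    rw [List.getElem?_eq_none (show (List.map (fun i => (List.range n.length).map (fun j => pvC n i j)) (List.range n.length)).length ≤ t by simpa using ht)]

theorem pv_a_eq (n : List (List Int)) :
    calc_similarity_scores n
      = (List.range n.length).map (fun i => (List.range n.length).map (fun j => pvC n i j)) := by
  simp only [calc_similarity_scores]
  rw [pv_foldl_const_append (PySem.List.pyRange 0 (n.length : Int)) (0 : Int) []]
  rw [pv_foldl_const_append (PySem.List.pyRange 0 (n.length : Int))
    ([] ++ List.replicate (PySem.List.pyRange 0 (n.length : Int)).length (0 : Int)) []]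
  rw [List.nil_append, List.nil_append, PySem.List.length_pyRange_one]
  have hlen : ((n.length : Int) - 0).toNat = n.length := by omega
  rw [hlen]
  rw [PySem.List.enumerate_eq_map_pyRange n [], PySem.List.len_eq, PySem.List.pyRange_zero_nat,
    List.map_map, List.foldl_map]
  simp only [Function.comp, PySem.List.pyGetD_natCast, Int.toNat_natCast]
  apply List.ext_getElem?
  intro t
  rw [pv_modifyRange_getElem
    (F := fun m row =>
      (List.range n.length).foldl
        (fun row s =>
          row.set s (num_in_common_between_lists (n.getD m []) (n.getD s []))) row)
    (G := fun mat m =>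
      ((List.range n.length).map (fun (k : Nat) => (k : Int))).foldl
        (fun sm uid =>
          sm.modify m (fun row =>
            row.set uid.toNat
              (num_in_common_between_lists (n.getD m []) (PySem.List.pyGetD n uid []))))
        mat)
    (hG := by
      intro mat m
      beta_reduce
      rw [List.foldl_map]
      simp only [Int.toNat_natCast, PySem.List.pyGetD_natCast]
      simp only [pv_foldl_modify_comm (List.range n.length) m
        (fun (s : Nat) (row : List Int) =>
          row.set s (num_in_common_between_lists (n.getD m []) (n.getD s [])))])]
  by_cases ht : t < n.length
  · rw [if_pos ht, List.getElem?_replicate, if_pos ht, List.getElem?_map,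
      List.getElem?_range ht, Option.map_some]
    congr 1
    apply List.ext_getElem?
    intro s
    rw [pv_setRange_getElem
      (fun s => num_in_common_between_lists (n.getD t []) (n.getD s []))]
    by_cases hs : s < n.length
    · rw [if_pos (by simp [hs]), List.getElem?_map, List.getElem?_range hs, Option.map_some]
      rw [pv_num_in_common]
      rfl
    · rw [if_neg (by simp [hs]), List.getElem?_replicate, if_neg hs,
        List.getElem?_eq_none (show ((List.range n.length).map (fun j => pvC n t j)).length ≤ s by simpa using hs)]
  · rw [if_neg ht, List.getElem?_replicate, if_neg ht]
    rw [List.getElem?_eq_none (show (List.map (fun i => (List.range n.length).map (fun j => pvC n i j)) (List.range n.length)).length ≤ t by simpa using ht)]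

-- ===== VERDICT (by name: the statement is the Claim_ definition above) =====
theorem calc_similarity_scores_spec : Claim_equal_calc_similarity_scores := by
  intro n _
  unfold Spec_calc_similarity_scores
  rw [pv_a_eq, pv_alt_eq]
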